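-- pv_equiv track=rewrite | github.com/ShizoTempest/SkillBox-Mobule | Module_18/10_the_truth/main.py | revert_text
-- ===== SOURCE A (Python) =====
-- def revert_text(line, key):
--     step_1 = ''
--     step_2 = ''
--     for F_word in line:
--         if F_word in word:
--             num = word.find(F_word)
--             step_1 += word[num - key]
--         else:
--             step_1 += F_word
--
--     place_index = 3
--
--     for words in step_1.split(' '):
--         new_word = ''
--         for index in range(len(words)):
--             new_word += (words[index - place_index % len(words)])
--         if new_word.endswith('/'):
--             place_index += 1
--         step_2 += new_word + ' '
--     answer_text = step_2.replace('/', '\n')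
--
--     return answer_text
--
-- word = 'abcdefghijklmnopqrstuvwxyzABCDEFGHIJKLMNOPQRSTUVWXYZ'
-- ===== SOURCE B (Python) =====
-- word = 'abcdefghijklmnopqrstuvwxyzABCDEFGHIJKLMNOPQRSTUVWXYZ'
--
--
-- def revert_text(line, key):
--     # phase 1: one rotated-alphabet table instead of a per-character find + index
--     k = key % len(word)
--     rot = word[-k:] + word[:-k] if k else word
--     table = dict(zip(word, rot))
--     step_1 = ''.join(table.get(c, c) for c in line)
--
--     # phase 2: rotate each word by slicing instead of an inner index loop
--     place_index = 3
--     pieces = []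
--     for w in step_1.split(' '):
--         if w:
--             off = place_index % len(w)
--             if off:
--                 w = w[-off:] + w[:-off]
--         if w.endswith('/'):
--             place_index += 1
--         pieces.append(w)
--     return (' '.join(pieces) + ' ').replace('/', '\n')
-- ===== Notes on version B (the rewrite author's own statement) =====
-- stated objective: faster
-- what changed: phase 1 replaces the per-character alphabet scan (word.find plus negative indexing) with one precomputed rotated-alphabet translation table looked up per character, and phase 2 replaces the inner character-by-character index loop with a single slice rotation per word joined at the end
import Mathlib
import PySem

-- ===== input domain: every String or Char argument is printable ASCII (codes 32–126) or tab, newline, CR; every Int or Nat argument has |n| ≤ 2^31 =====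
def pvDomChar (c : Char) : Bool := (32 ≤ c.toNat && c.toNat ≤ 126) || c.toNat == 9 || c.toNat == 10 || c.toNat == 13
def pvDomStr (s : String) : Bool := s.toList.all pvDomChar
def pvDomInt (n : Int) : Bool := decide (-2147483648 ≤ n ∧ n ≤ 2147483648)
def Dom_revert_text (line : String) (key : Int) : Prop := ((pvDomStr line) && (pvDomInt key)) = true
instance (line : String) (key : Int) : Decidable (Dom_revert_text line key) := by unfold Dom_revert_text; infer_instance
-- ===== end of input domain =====

-- B: phase 1 uses one precomputed rotated-alphabet translation table instead of a per-character
-- alphabet scan, and phase 2 rotates each word by slicing instead of an inner index loop.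

-- ===== PORT A =====
def pvWord : List Char := "abcdefghijklmnopqrstuvwxyzABCDEFGHIJKLMNOPQRSTUVWXYZ".toList

-- A's step_1 loop: per character, find in the alphabet and index word[num - key]
-- (Pre_ keeps that index in range; pyGetD's default is never used under Pre_)
def pvStep1A (key : Int) (cs : List Char) : List Char :=
  cs.foldl (fun acc c =>
    if PySem.Chars.isIn [c] pvWord = true then
      acc ++ [PySem.List.pyGetD pvWord (PySem.Chars.find pvWord [c] - key) ' ']
    else acc ++ [c]) []

-- A's step_2 loop: inner index loop new_word += words[index - place_index % len(words)]
-- (the index is always in [-(len-1), len-1], so pyGetD's default is never used)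
def pvLoopA (toks : List (List Char)) : Int × List Char :=
  toks.foldl (fun st ws =>
    let nw := (PySem.List.pyRange 0 (ws.length : Int) 1).foldl
      (fun nw idx => nw ++ [PySem.List.pyGetD ws (idx - PySem.Int.mod st.1 (ws.length : Int)) ' ']) []
    (if PySem.Chars.endswith nw ['/'] = true then st.1 + 1 else st.1, st.2 ++ nw ++ [' '])) (3, [])

def revert_text (line : String) (key : Int) : String :=
  String.ofList (PySem.Chars.replace
    (pvLoopA (PySem.Chars.splitOn (pvStep1A key line.toList) [' '])).2 ['/'] ['\n'])

-- ===== PORT B =====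
-- w[-off:] + w[:-off]
def pvRot (xs : List Char) (off : Int) : List Char :=
  PySem.List.slice xs (some (-off)) none ++ PySem.List.slice xs none (some (-off))

-- table = dict(zip(word, rot)) with rot = word[-k:] + word[:-k], k = key % len(word)
def pvTable (key : Int) : PySem.Dict Char Char :=
  let k := PySem.Int.mod key (pvWord.length : Int)
  let rot := if k ≠ 0 then pvRot pvWord k else pvWord
  (pvWord.zip rot).foldl (fun d p => PySem.Dict.insert d p.1 p.2) ⟨[]⟩

-- B's phase-2 loop: per token, one slice rotation, collected into a list of pieces
def pvLoopB (toks : List (List Char)) : Int × List (List Char) :=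
  toks.foldl (fun st w =>
    let w2 := if w ≠ [] then
        (if PySem.Int.mod st.1 (w.length : Int) ≠ 0 then pvRot w (PySem.Int.mod st.1 (w.length : Int)) else w)
      else w
    (if PySem.Chars.endswith w2 ['/'] = true then st.1 + 1 else st.1, st.2 ++ [w2])) (3, [])

def revert_text_alt (line : String) (key : Int) : String :=
  String.ofList (PySem.Chars.replace
    (PySem.Chars.join [' ']
      (pvLoopB (PySem.Chars.splitOn
        (line.toList.map (fun c => PySem.Dict.getD (pvTable key) c c)) [' '])).2
     ++ [' ']) ['/'] ['\n'])

-- ===== PRECONDITION & SPEC =====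
-- Pre_ excludes exactly the inputs where A raises IndexError: a letter of the line whose
-- alphabet index minus key falls outside [-52, 51] makes word[num - key] raise in A.
def Pre_revert_text (line : String) (key : Int) : Prop :=
  (line.toList.all (fun c => !(PySem.Chars.isIn [c] pvWord) ||
    (decide (-52 ≤ PySem.Chars.find pvWord [c] - key) &&
     decide (PySem.Chars.find pvWord [c] - key ≤ 51)))) = true
instance (line : String) (key : Int) : Decidable (Pre_revert_text line key) := by
  unfold Pre_revert_text; infer_instance

def pvWitness_revert_text : String × Int := ("aZ c/ d", 3)

def Spec_revert_text (line : String) (key : Int) (out : String) : Prop := out = revert_text_alt line key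
instance (line : String) (key : Int) (out : String) : Decidable (Spec_revert_text line key out) := by
  unfold Spec_revert_text; infer_instance

-- ===== CLAIM (what is proved, stated in full; the proofs are below) =====
def Claim_equal_revert_text : Prop := ∀ (line : String) (key : Int), Dom_revert_text line key → Pre_revert_text line key → Spec_revert_text line key (revert_text line key)

-- ===== LEMMAS AND PROOFS =====

theorem pv_pre_iff (line : String) (key : Int) : Pre_revert_text line key ↔
    (∀ c ∈ line.toList, PySem.Chars.isIn [c] pvWord = true →
      -52 ≤ PySem.Chars.find pvWord [c] - key ∧ PySem.Chars.find pvWord [c] - key ≤ 51) := by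
  simp [Pre_revert_text, List.all_eq_true, Bool.or_eq_true, Bool.not_eq_true',
    Bool.and_eq_true, decide_eq_true_iff, imp_iff_not_or]

theorem pv_pyGetD_emod {α : Type} (xs : List α) (d : α) (i : Int)
    (h1 : -(xs.length : Int) ≤ i) (h2 : i < xs.length) (h0 : xs ≠ []) :
    PySem.List.pyGetD xs i d =
      xs[(i.emod (xs.length : Int)).toNat]'(by
        have hl := List.length_pos_of_ne_nil h0
        have h3 : i.emod (xs.length : Int) < (xs.length : Int) := Int.emod_lt_of_pos _ (by exact_mod_cast hl)
        omega) := by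
  have hl := List.length_pos_of_ne_nil h0
  simp only [PySem.List.pyGetD, PySem.List.pyGet?, PySem.List.pyIdx?]
  by_cases ha : 0 ≤ i
  · have : i.emod (xs.length : Int) = i := Int.emod_eq_of_lt ha h2
    simp [ha, h2, this]
  · have he : i.emod (xs.length : Int) = i + xs.length := by
      calc i.emod (xs.length : Int) = (i + xs.length) % (xs.length : Int) := by
            rw [Int.add_emod_right]; rfl
        _ = i + xs.length := Int.emod_eq_of_lt (by omega) (by omega)
    have hk : xs.length - (-i).toNat = (i.emod (xs.length : Int)).toNat := by omega
    simp [ha, h1, hk, List.getElem?_eq_getElem (by omega : (i.emod (xs.length:Int)).toNat < xs.length)]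

theorem pv_rot_eq_rotate (xs : List Char) (off : Int) (h1 : 0 < off) (h2 : off < xs.length) :
    pvRot xs off = xs.rotate (xs.length - off.toNat) := by
  have hc : PySem.List.clampIdx xs.length (-off) = xs.length - off.toNat := by
    simp only [PySem.List.clampIdx]
    rw [if_pos (by omega), if_neg (by omega)]
    omega
  simp only [pvRot, PySem.List.slice, hc]
  rw [List.rotate_eq_drop_append_take (by omega)]
  congr 1
  · rw [List.take_of_length_le (by simp)]

theorem pv_inner_loop (ws : List Char) (p : Int) :
    (PySem.List.pyRange 0 (ws.length : Int) 1).foldl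
      (fun nw idx => nw ++ [PySem.List.pyGetD ws (idx - PySem.Int.mod p (ws.length : Int)) ' ']) []
    = (if ws ≠ [] then
        (if PySem.Int.mod p (ws.length : Int) ≠ 0 then pvRot ws (PySem.Int.mod p (ws.length : Int)) else ws)
      else ws) := by
  by_cases h0 : ws = []
  · subst h0; simp [PySem.List.pyRange]
  · rw [if_pos h0]
    have hlen : 0 < ws.length := List.length_pos_of_ne_nil h0
    have hlen' : (0 : Int) < (ws.length : Int) := by exact_mod_cast hlen
    set off := PySem.Int.mod p (ws.length : Int) with hoff
    have hge : 0 ≤ off := PySem.Int.mod_nonneg _ hlen'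
    have hlt : off < ws.length := PySem.Int.mod_lt _ hlen'
    rw [PySem.List.foldl_append_singleton_eq_map, List.nil_append]
    have hR : (if off ≠ 0 then pvRot ws off else ws) = ws.rotate (ws.length - off.toNat) := by
      by_cases hz : off = 0
      · simp [hz, List.rotate_length]
      · rw [if_pos hz]; exact pv_rot_eq_rotate ws off (by omega) hlt
    rw [hR]
    apply List.ext_getElem
    · simp [List.length_rotate]
    · intro i h1 h2
      rw [List.getElem_rotate]
      have h3 : (List.map (fun idx => PySem.List.pyGetD ws (idx - off) ' ')
          (PySem.List.pyRange 0 (ws.length : Int) 1))[i]? = some (PySem.List.pyGetD ws ((i : Int) - off) ' ') :=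
        PySem.List.getElem?_map_pyRange_zero _ ws.length i (by
          simp [PySem.List.length_pyRange_one] at h1; omega)
      rw [List.getElem?_eq_getElem h1] at h3
      have h4 := Option.some.inj h3
      rw [h4]
      have hi : i < ws.length := by simp [List.length_rotate] at h2; omega
      rw [pv_pyGetD_emod ws ' ' ((i : Int) - off) (by omega) (by omega) h0]
      congr 1
      set o := off.toNat with ho
      have hoo : off = (o : Int) := by omega
      by_cases hcase : o ≤ i
      · have he : ((i : Int) - off).emod (ws.length : Int) = (i : Int) - off :=
          Int.emod_eq_of_lt (by omega) (by omega)
        have : (i + (ws.length - o)) % ws.length = (i - o) % ws.length := by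
          rw [show i + (ws.length - o) = (i - o) + ws.length by omega, Nat.add_mod_right]
        rw [this, Nat.mod_eq_of_lt (by omega)]
        omega
      · have he : ((i : Int) - off).emod (ws.length : Int) = (i : Int) - off + ws.length := by
          calc ((i : Int) - off).emod (ws.length : Int)
              = ((i : Int) - off + ws.length) % (ws.length : Int) := by rw [Int.add_emod_right]; rfl
            _ = (i : Int) - off + ws.length := Int.emod_eq_of_lt (by omega) (by omega)
        rw [Nat.mod_eq_of_lt (by omega)]
        omega

theorem pv_find_go_singleton (c : Char) : ∀ (l : List Char) (k : Nat),
    PySem.Chars.find.go [c] l k = if c ∈ l then ((k : Int) + l.idxOf c) else -1 := by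
  intro l
  induction l with
  | nil => intro k; simp [PySem.Chars.find.go]
  | cons h t ih =>
    intro k
    rw [PySem.Chars.find.go]
    by_cases hc : c = h
    · subst hc
      simp [List.isPrefixOf, List.idxOf_cons_self]
    · have hbeq : (c == h) = false := by simp [hc]
      simp [List.isPrefixOf, hbeq, ih (k + 1), Ne.symm hc]
      by_cases hm : c ∈ t
      · simp [hm]; omega
      · simp [hm, hc]

theorem pv_find_singleton (l : List Char) (c : Char) :
    PySem.Chars.find l [c] = if c ∈ l then (l.idxOf c : Int) else -1 := by
  rw [show PySem.Chars.find l [c] = PySem.Chars.find.go [c] l 0 from rfl, pv_find_go_singleton]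
  simp

theorem pv_isIn_singleton (l : List Char) (c : Char) :
    PySem.Chars.isIn [c] l = true ↔ c ∈ l := by
  rw [show PySem.Chars.isIn [c] l = (PySem.Chars.find l [c] != -1) from rfl, pv_find_singleton]
  by_cases hm : c ∈ l <;> simp [hm]

theorem pv_foldl_insert_items (ps : List (Char × Char)) : ∀ (d : PySem.Dict Char Char),
    (ps.map Prod.fst).Nodup → (∀ p ∈ ps, d.contains p.1 = false) →
    (ps.foldl (fun d p => PySem.Dict.insert d p.1 p.2) d).items = d.items ++ ps := by
  induction ps with
  | nil => intro d _ _; simp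
  | cons q t ih =>
    intro d hnd h
    have hq : d.contains q.1 = false := h q (by simp)
    have hins : (PySem.Dict.insert d q.1 q.2).items = d.items ++ [(q.1, q.2)] := by
      simp [PySem.Dict.insert, hq]
    rw [List.foldl_cons, ih _ (by simpa using hnd.of_cons)]
    · rw [hins]; simp
    · intro p hp
      have hq1 : q.1 ∉ t.map Prod.fst := (List.nodup_cons.mp (by simpa using hnd)).1
      have hne : p.1 ≠ q.1 := fun he => hq1 (he ▸ List.mem_map_of_mem (f := Prod.fst) hp)
      simp [PySem.Dict.contains, hins, List.any_append]
      constructor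
      · have := h p (by simp [hp])
        simpa [PySem.Dict.contains] using this
      · exact fun he => hne he.symm

theorem pv_find?_zip (xs : List Char) : ∀ (ys : List Char) (c : Char), xs.length ≤ ys.length →
    List.find? (fun p => p.1 == c) (xs.zip ys) =
      if c ∈ xs then (ys[xs.idxOf c]?).map (fun y => (c, y)) else none := by
  induction xs with
  | nil => intro ys c _; simp
  | cons x xt ih =>
    intro ys c hlen
    cases ys with
    | nil => simp at hlen
    | cons y yt =>
      simp only [List.zip_cons_cons, List.find?_cons]
      by_cases hc : x = c
      · subst hc
        simp [List.idxOf_cons_self]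
      · have hbeq : (x == c) = false := by simp [hc]
        simp only [hbeq]
        rw [ih yt c (by simpa using hlen)]
        by_cases hm : c ∈ xt
        · simp [hm, hc, Ne.symm hc]
        · simp [hm, hc, Ne.symm hc]



theorem pv_char_eq (key : Int) (c : Char)
    (h : PySem.Chars.isIn [c] pvWord = true →
      -52 ≤ PySem.Chars.find pvWord [c] - key ∧ PySem.Chars.find pvWord [c] - key ≤ 51) :
    (if PySem.Chars.isIn [c] pvWord = true then
        PySem.List.pyGetD pvWord (PySem.Chars.find pvWord [c] - key) ' '
      else c)
    = PySem.Dict.getD (pvTable key) c c := by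
  have hlen : pvWord.length = 52 := by decide
  have hnd : pvWord.Nodup := by decide
  obtain ⟨k, hk⟩ : ∃ k, k = PySem.Int.mod key (pvWord.length : Int) := ⟨_, rfl⟩
  have h52 : (0 : Int) < (pvWord.length : Int) := by rw [hlen]; norm_num
  have hge : 0 ≤ k := hk ▸ PySem.Int.mod_nonneg _ h52
  have hlt : k < (pvWord.length : Int) := hk ▸ PySem.Int.mod_lt _ h52
  have hke : k = key.emod (pvWord.length : Int) := by
    rw [hk, PySem.Int.mod_eq_emod_of_pos h52]; rfl
  obtain ⟨rot, hrotdef⟩ : ∃ r, r = if k ≠ 0 then pvRot pvWord k else pvWord := ⟨_, rfl⟩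
  have hR : rot = pvWord.rotate (pvWord.length - k.toNat) := by
    by_cases hz : k = 0
    · simp [hrotdef, hz, List.rotate_length]
    · rw [hrotdef, if_pos hz]; exact pv_rot_eq_rotate pvWord k (by omega) hlt
  have hrlen : rot.length = pvWord.length := by rw [hR, List.length_rotate]
  have hitems : (pvTable key).items = pvWord.zip rot := by
    have hT : pvTable key = (pvWord.zip rot).foldl (fun d p => PySem.Dict.insert d p.1 p.2) ⟨[]⟩ := by
      rw [pvTable, hrotdef, hk]
    rw [hT, pv_foldl_insert_items _ _ (by rw [List.map_fst_zip (by omega)]; exact hnd)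
      (by intro p _; simp [PySem.Dict.contains])]
    simp
  have hget : (pvTable key).get? c = ((rot[pvWord.idxOf c]?).map (fun y => (c, y))).map Prod.snd := by
    rw [PySem.Dict.get?, hitems, pv_find?_zip _ _ _ (by omega)]
    by_cases hm : c ∈ pvWord
    · simp [hm]
    · have hnm : rot.length ≤ List.idxOf c pvWord := by
        have := List.idxOf_eq_length_iff.mpr hm; omega
      have hnone : rot[List.idxOf c pvWord]? = none := List.getElem?_eq_none hnm
      rw [if_neg hm, hnone]
      simp
  by_cases hm : c ∈ pvWord
  · have hin : PySem.Chars.isIn [c] pvWord = true := (pv_isIn_singleton _ _).mpr hm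
    rw [if_pos hin]
    have hidx : List.idxOf c pvWord < pvWord.length := List.idxOf_lt_length_of_mem hm
    have hfind : PySem.Chars.find pvWord [c] = (List.idxOf c pvWord : Int) := by
      rw [pv_find_singleton, if_pos hm]
    obtain ⟨hb1, hb2⟩ := h hin
    rw [hfind] at hb1 hb2
    rw [hfind, pv_pyGetD_emod pvWord ' ' _ (by omega) (by omega) (by decide)]
    rw [PySem.Dict.getD, hget]
    rw [List.getElem?_eq_getElem (by omega : List.idxOf c pvWord < rot.length)]
    simp only [Option.map_some, Option.getD_some]
    have hgr : rot[List.idxOf c pvWord]'(by omega)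
        = pvWord[(List.idxOf c pvWord + (pvWord.length - k.toNat)) % pvWord.length]'(by
            exact Nat.mod_lt _ (by omega)) := by
      have := List.getElem_rotate pvWord (pvWord.length - k.toNat) (List.idxOf c pvWord)
        (by rw [List.length_rotate]; omega)
      calc rot[List.idxOf c pvWord]'(by omega)
          = (pvWord.rotate (pvWord.length - k.toNat))[List.idxOf c pvWord]'(by
              rw [List.length_rotate]; omega) := by
            congr 1 <;> rw [hR]
        _ = _ := this
    rw [hgr]
    congr 1
    rw [hlen] at hidx hlt ⊢
    rw [hlen] at hke
    push_cast at hke ⊢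
    rw [show ((List.idxOf c pvWord : Int) - key).emod 52 = ((List.idxOf c pvWord : Int) - key) % 52 from rfl] at *
    rw [show key.emod 52 = key % 52 from rfl] at hke
    omega
  · have hnin : ¬ PySem.Chars.isIn [c] pvWord = true := by
      rw [pv_isIn_singleton]; exact hm
    rw [if_neg hnin, PySem.Dict.getD, hget]
    have hnm : rot.length ≤ List.idxOf c pvWord := by
      have := List.idxOf_eq_length_iff.mpr hm; omega
    have hnone : rot[List.idxOf c pvWord]? = none := List.getElem?_eq_none hnm
    rw [hnone]
    simp


theorem pv_step1A_map (key : Int) (cs : List Char) :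
    pvStep1A key cs = cs.map (fun c =>
      if PySem.Chars.isIn [c] pvWord = true then
        PySem.List.pyGetD pvWord (PySem.Chars.find pvWord [c] - key) ' '
      else c) := by
  rw [pvStep1A]
  have : (fun (acc : List Char) c =>
      if PySem.Chars.isIn [c] pvWord = true then
        acc ++ [PySem.List.pyGetD pvWord (PySem.Chars.find pvWord [c] - key) ' ']
      else acc ++ [c])
    = (fun acc c => acc ++ [if PySem.Chars.isIn [c] pvWord = true then
        PySem.List.pyGetD pvWord (PySem.Chars.find pvWord [c] - key) ' ' else c]) := by
    funext acc c; split <;> rfl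
  rw [this, PySem.List.foldl_append_singleton_eq_map, List.nil_append]

def pvSpecList : List (List Char) → Int → List (List Char)
  | [], _ => []
  | w :: t, p =>
    let w2 := if w ≠ [] then
        (if PySem.Int.mod p (w.length : Int) ≠ 0 then pvRot w (PySem.Int.mod p (w.length : Int)) else w)
      else w
    w2 :: pvSpecList t (if PySem.Chars.endswith w2 ['/'] = true then p + 1 else p)

theorem pv_loopB_spec (toks : List (List Char)) : ∀ (p : Int) (acc : List (List Char)),
    (toks.foldl (fun st w =>
      let w2 := if w ≠ [] then
          (if PySem.Int.mod st.1 (w.length : Int) ≠ 0 then pvRot w (PySem.Int.mod st.1 (w.length : Int)) else w)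
        else w
      (if PySem.Chars.endswith w2 ['/'] = true then st.1 + 1 else st.1, st.2 ++ [w2])) (p, acc)).2
    = acc ++ pvSpecList toks p := by
  induction toks with
  | nil => intro p acc; simp [pvSpecList]
  | cons w t ih =>
    intro p acc
    rw [List.foldl_cons, pvSpecList]
    simp only []
    rw [ih]
    simp

theorem pv_loopA_spec' (toks : List (List Char)) : ∀ (p : Int) (acc : List Char),
    (toks.foldl (fun st ws =>
      let nw := if ws ≠ [] then
          (if PySem.Int.mod st.1 (ws.length : Int) ≠ 0 then pvRot ws (PySem.Int.mod st.1 (ws.length : Int)) else ws)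
        else ws
      (if PySem.Chars.endswith nw ['/'] = true then st.1 + 1 else st.1, st.2 ++ nw ++ [' '])) (p, acc)).2
    = acc ++ ((pvSpecList toks p).map (fun w => w ++ [' '])).flatten := by
  induction toks with
  | nil => intro p acc; simp [pvSpecList]
  | cons w t ih =>
    intro p acc
    rw [List.foldl_cons, pvSpecList]
    simp only []
    rw [ih]
    simp

theorem pv_loopA_spec (toks : List (List Char)) (p : Int) (acc : List Char) :
    (toks.foldl (fun st ws =>
      let nw := (PySem.List.pyRange 0 (ws.length : Int) 1).foldl
        (fun nw idx => nw ++ [PySem.List.pyGetD ws (idx - PySem.Int.mod st.1 (ws.length : Int)) ' ']) []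
      (if PySem.Chars.endswith nw ['/'] = true then st.1 + 1 else st.1, st.2 ++ nw ++ [' '])) (p, acc)).2
    = acc ++ ((pvSpecList toks p).map (fun w => w ++ [' '])).flatten := by
  have hf : (fun (st : Int × List Char) ws =>
      let nw := (PySem.List.pyRange 0 (ws.length : Int) 1).foldl
        (fun nw idx => nw ++ [PySem.List.pyGetD ws (idx - PySem.Int.mod st.1 (ws.length : Int)) ' ']) []
      (if PySem.Chars.endswith nw ['/'] = true then st.1 + 1 else st.1, st.2 ++ nw ++ [' ']))
    = (fun st ws =>
      let nw := if ws ≠ [] then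
          (if PySem.Int.mod st.1 (ws.length : Int) ≠ 0 then pvRot ws (PySem.Int.mod st.1 (ws.length : Int)) else ws)
        else ws
      (if PySem.Chars.endswith nw ['/'] = true then st.1 + 1 else st.1, st.2 ++ nw ++ [' '])) := by
    funext st ws
    simp only [pv_inner_loop]
  rw [hf, pv_loopA_spec']

theorem pv_join_flat : ∀ (t : List (List Char)) (x : List Char),
    PySem.Chars.join [' '] (x :: t) ++ [' '] = ((x :: t).map (fun w => w ++ [' '])).flatten := by
  intro t
  induction t with
  | nil => intro x; simp [PySem.Chars.join, List.intercalate]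
  | cons y t ih =>
    intro x
    have hI : PySem.Chars.join [' '] (x :: y :: t) = x ++ ' ' :: PySem.Chars.join [' '] (y :: t) := by
      simp [PySem.Chars.join, List.intercalate, List.intersperse]
    rw [hI]
    have := ih y
    simp only [List.map_cons, List.flatten_cons] at this ⊢
    rw [List.append_assoc, ← this]
    simp

theorem pv_splitOn_go_ne_nil (sep : List Char) : ∀ (fuel : Nat) (l cur : List Char) (acc : List (List Char)),
    PySem.Chars.splitOn.go sep fuel l cur acc ≠ [] := by
  intro fuel
  induction fuel with
  | zero => intro l cur acc; simp [PySem.Chars.splitOn.go]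
  | succ fuel ih =>
    intro l cur acc
    cases l with
    | nil => simp [PySem.Chars.splitOn.go]
    | cons c rest =>
      rw [PySem.Chars.splitOn.go]
      split
      · exact ih _ _ _
      · exact ih _ _ _

theorem pv_splitOn_ne_nil (s : List Char) : PySem.Chars.splitOn s [' '] ≠ [] := by
  rw [PySem.Chars.splitOn]
  exact pv_splitOn_go_ne_nil _ _ _ _ _

theorem pv_main (line : String) (key : Int)
    (hpre : ∀ c ∈ line.toList, PySem.Chars.isIn [c] pvWord = true →
      -52 ≤ PySem.Chars.find pvWord [c] - key ∧ PySem.Chars.find pvWord [c] - key ≤ 51) :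
    revert_text line key = revert_text_alt line key := by
  rw [revert_text, revert_text_alt]
  have hs1 : pvStep1A key line.toList
      = line.toList.map (fun c => PySem.Dict.getD (pvTable key) c c) := by
    rw [pv_step1A_map]
    exact List.map_congr_left (fun c hc => pv_char_eq key c (hpre c hc))
  rw [hs1]
  congr 1
  rcases htoks : PySem.Chars.splitOn
      (line.toList.map (fun c => PySem.Dict.getD (pvTable key) c c)) [' '] with _ | ⟨x, t⟩
  · exact absurd htoks (pv_splitOn_ne_nil _)
  · rw [pvLoopA, pvLoopB, pv_loopA_spec, pv_loopB_spec, List.nil_append, List.nil_append,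
      pvSpecList]
    rw [pv_join_flat]

-- ===== VERDICT (by name: the statement is the Claim_ definition above) =====
theorem revert_text_spec : Claim_equal_revert_text := by
  intro line key _ hpre
  unfold Spec_revert_text
  exact pv_main line key ((pv_pre_iff line key).mp hpre)
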